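-- pv_equiv track=rewrite | github.com/achieverForever/NLP | bmm_segment.py | constructResult
-- ===== SOURCE A (Python) =====
-- def constructResult(inputStr, cutFlags):
-- 	result = ''
-- 	for i, isCut in enumerate(cutFlags):
-- 		if isCut:
-- 			result += inputStr[i] + '/  '
-- 		else:
-- 			result += inputStr[i]
-- 	return result
-- ===== SOURCE B (Python) =====
-- def constructResult(inputStr, cutFlags):
-- 	n = len(cutFlags)
-- 	cuts = [i + 1 for i, f in enumerate(cutFlags) if f]
-- 	bounds = [0] + cuts + [n]
-- 	segments = [inputStr[a:b] for a, b in zip(bounds, bounds[1:])]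
-- 	return '/  '.join(segments)
-- ===== Notes on version B (the rewrite author's own statement) =====
-- stated objective: alternative
-- what changed: B computes the cut positions first, builds a boundary list [0]+cuts+[n], slices the string between consecutive boundaries and joins the slices with '/ ', instead of A's per-character accumulation with the separator appended inline.
import Mathlib
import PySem

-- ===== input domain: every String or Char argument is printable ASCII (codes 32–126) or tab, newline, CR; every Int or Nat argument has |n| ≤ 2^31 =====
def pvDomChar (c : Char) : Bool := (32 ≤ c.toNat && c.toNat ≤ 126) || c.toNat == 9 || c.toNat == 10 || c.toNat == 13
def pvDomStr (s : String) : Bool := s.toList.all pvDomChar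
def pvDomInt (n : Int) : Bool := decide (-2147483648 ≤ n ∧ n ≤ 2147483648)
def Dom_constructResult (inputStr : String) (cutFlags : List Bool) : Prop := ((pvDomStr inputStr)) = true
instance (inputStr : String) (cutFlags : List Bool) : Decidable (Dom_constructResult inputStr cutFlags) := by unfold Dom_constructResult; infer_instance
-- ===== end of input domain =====

-- B re-derives the answer from segment boundaries: it first computes the cut positions,
-- then slices the string between consecutive boundaries and joins the slices with '/  '
-- (alternative decomposition, same cost).

-- ===== PORT A =====
-- the for-loop over enumerate(cutFlags): result accumulated as List Char;
-- inputStr[i] via PySem pyGet? (IndexError excluded by Pre_, default never used inside Pre_)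
def crLoopA (cs : List Char) : List Bool → Nat → List Char → List Char
  | [], _, result => result
  | true :: rest, i, result =>
      let ch := (PySem.List.pyGet? cs (i : Int)).getD ' '
      crLoopA cs rest (i + 1) (result ++ [ch, '/', ' ', ' '])
  | false :: rest, i, result =>
      let ch := (PySem.List.pyGet? cs (i : Int)).getD ' '
      crLoopA cs rest (i + 1) (result ++ [ch])

def constructResult (inputStr : String) (cutFlags : List Bool) : String :=
  String.ofList (crLoopA inputStr.toList cutFlags 0 [])

-- ===== PORT B =====
-- transliteration of Source B: cut positions via enumerate, boundary list [0]+cuts+[n],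
-- string slices between consecutive boundaries, joined with '/  '
def constructResult_alt (inputStr : String) (cutFlags : List Bool) : String :=
  let cs := inputStr.toList
  let n : Int := cutFlags.length
  let cuts : List Int :=
    (PySem.List.enumerate cutFlags).filterMap (fun p => if p.2 then some (p.1 + 1) else none)
  let bounds : List Int := 0 :: (cuts ++ [n])
  let segments : List (List Char) :=
    (bounds.zip bounds.tail).map (fun p => PySem.Chars.slice cs (some p.1) (some p.2))
  String.ofList (PySem.Chars.join ['/', ' ', ' '] segments)

-- ===== PRECONDITION & SPEC =====
-- Pre_ excludes exactly the inputs where A's inputStr[i] raises IndexError: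
-- cutFlags longer than inputStr.
def Pre_constructResult (inputStr : String) (cutFlags : List Bool) : Prop :=
  cutFlags.length ≤ inputStr.toList.length
instance (inputStr : String) (cutFlags : List Bool) : Decidable (Pre_constructResult inputStr cutFlags) := by
  unfold Pre_constructResult; infer_instance
def pvWitness_constructResult : String × List Bool := ("abc", [true, false, true])
def Spec_constructResult (inputStr : String) (cutFlags : List Bool) (out : String) : Prop := out = constructResult_alt inputStr cutFlags
instance (inputStr : String) (cutFlags : List Bool) (out : String) : Decidable (Spec_constructResult inputStr cutFlags out) := by unfold Spec_constructResult; infer_instance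

-- ===== CLAIM (what is proved, stated in full; the proofs are below) =====
def Claim_equal_constructResult : Prop := ∀ (inputStr : String) (cutFlags : List Bool), Dom_constructResult inputStr cutFlags → Pre_constructResult inputStr cutFlags → Spec_constructResult inputStr cutFlags (constructResult inputStr cutFlags)
-- ===== LEMMAS AND PROOFS =====

-- common reference function: the segmented output, by simultaneous recursion
def specF : List Bool → List Char → List Char
  | [], _ => []
  | _ :: _, [] => []
  | true :: fs, c :: cs => c :: '/' :: ' ' :: ' ' :: specF fs cs
  | false :: fs, c :: cs => c :: specF fs cs

-- Nat-level mirrors of B's intermediate data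
def cutsN : List Bool → Nat → List Nat
  | [], _ => []
  | true :: fs, k => (k + 1) :: cutsN fs (k + 1)
  | false :: fs, k => cutsN fs (k + 1)

def boundsN (k : Nat) (flags : List Bool) : List Nat :=
  k :: (cutsN flags k ++ [k + flags.length])

def segN (cs : List Char) (p : Nat × Nat) : List Char :=
  (cs.drop p.1).take (p.2 - p.1)

def segsN (cs : List Char) (L : List Nat) : List (List Char) :=
  (L.zip L.tail).map (segN cs)

theorem crLoopA_prefix (cs : List Char) (flags : List Bool) (i : Nat) (r : List Char) :
    crLoopA cs flags i r = r ++ crLoopA cs flags i [] := by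
  induction flags generalizing i r with
  | nil => simp [crLoopA]
  | cons f rest ih =>
      cases f <;> simp only [crLoopA] <;> (conv_rhs => rw [ih]) <;> rw [ih] <;>
        simp [List.append_assoc]

theorem crLoopA_eq_specF (cs : List Char) (flags : List Bool) (i : Nat)
    (h : i + flags.length ≤ cs.length) :
    crLoopA cs flags i [] = specF flags (cs.drop i) := by
  induction flags generalizing i with
  | nil => simp [crLoopA, specF]
  | cons f fs ih =>
      have hi : i < cs.length := by simp at h; omega
      have hdrop : cs.drop i = cs[i] :: cs.drop (i + 1) := List.drop_eq_getElem_cons hi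
      have hget : (PySem.List.pyGet? cs (i : Int)).getD ' ' = cs[i] := by
        simp [PySem.List.pyGet?_natCast, List.getElem?_eq_getElem hi]
      cases f <;> simp only [crLoopA, hget] <;> rw [crLoopA_prefix, hdrop] <;>
        simp only [specF] <;> rw [ih (i + 1) (by simp at h ⊢; omega)] <;> simp

theorem cutsN_gt (flags : List Bool) (k : Nat) : ∀ x ∈ cutsN flags k, k < x := by
  induction flags generalizing k with
  | nil => simp [cutsN]
  | cons f fs ih =>
      intro x hx
      cases f with
      | false =>
          have := ih (k + 1) x (by simpa [cutsN] using hx)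
          omega
      | true =>
          simp only [cutsN, List.mem_cons] at hx
          rcases hx with rfl | hx
          · omega
          · have := ih (k + 1) x hx
            omega

theorem join_head_prefix (sep b h : List Char) (t : List (List Char)) :
    PySem.Chars.join sep ((b ++ h) :: t) = b ++ PySem.Chars.join sep (h :: t) := by
  cases t with
  | nil => simp [PySem.Chars.join_singleton]
  | cons h2 t2 => simp [PySem.Chars.join_cons_cons]

theorem segsN_join_eq_specF (cs : List Char) (flags : List Bool) (k : Nat)
    (h : k + flags.length ≤ cs.length) :
    PySem.Chars.join ['/', ' ', ' '] (segsN cs (boundsN k flags)) =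
      specF flags (cs.drop k) := by
  induction flags generalizing k with
  | nil =>
      simp [boundsN, cutsN, segsN, segN, PySem.Chars.join_singleton, specF]
  | cons f fs ih =>
      have hk : k < cs.length := by simp at h; omega
      have hdrop : cs.drop k = cs[k] :: cs.drop (k + 1) := List.drop_eq_getElem_cons hk
      have hrec : k + 1 + fs.length ≤ cs.length := by simp at h ⊢; omega
      obtain ⟨l0, lt, hL⟩ : ∃ l0 lt, cutsN fs (k + 1) ++ [k + 1 + fs.length] = l0 :: lt := by
        cases hc : cutsN fs (k + 1) with
        | nil => exact ⟨k + 1 + fs.length, [], by simp⟩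
        | cons a b => exact ⟨a, b ++ [k + 1 + fs.length], by simp⟩
      have hb' : boundsN (k + 1) fs = (k + 1) :: l0 :: lt := by
        simp only [boundsN]; rw [hL]
      have ihk := ih (k + 1) hrec
      rw [hb'] at ihk
      simp only [segsN, List.zip_cons_cons, List.tail_cons, List.map_cons] at ihk
      cases f
      · -- false: first segment absorbs cs[k]
        have hl0 : k < l0 := by
          have hm : l0 ∈ cutsN fs (k + 1) ++ [k + 1 + fs.length] := by rw [hL]; simp
          rcases List.mem_append.mp hm with hm | hm
          · have := cutsN_gt fs (k + 1) l0 hm; omega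
          · simp at hm; omega
        have hb : boundsN k (false :: fs) = k :: l0 :: lt := by
          simp only [boundsN, cutsN, List.length_cons]
          rw [show k + (fs.length + 1) = k + 1 + fs.length by omega, hL]
        have hseg : segN cs (k, l0) = cs[k] :: segN cs (k + 1, l0) := by
          simp only [segN]
          rw [show l0 - k = (l0 - (k + 1)) + 1 by omega, hdrop, List.take_succ_cons]
        rw [hb]
        simp only [segsN, List.zip_cons_cons, List.tail_cons, List.map_cons]
        rw [hseg, show (cs[k] :: segN cs (k + 1, l0)) = [cs[k]] ++ segN cs (k + 1, l0) by simp,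
            join_head_prefix, ihk, hdrop]
        simp [specF]
      · -- true: first segment is [cs[k]], then a separator
        have hb : boundsN k (true :: fs) = k :: (k + 1) :: l0 :: lt := by
          simp only [boundsN, cutsN, List.length_cons, List.cons_append]
          rw [show k + (fs.length + 1) = k + 1 + fs.length by omega, hL]
        have hseg : segN cs (k, k + 1) = [cs[k]] := by
          simp only [segN]
          rw [show k + 1 - k = 0 + 1 by omega, hdrop, List.take_succ_cons, List.take_zero]
        rw [hb]
        simp only [segsN, List.zip_cons_cons, List.tail_cons, List.map_cons]
        rw [hseg, PySem.Chars.join_cons_cons, ihk, hdrop]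
        simp [specF]

theorem filterMap_cuts_false (a : Int) (l : List (Int × Bool)) :
    ((a, false) :: l).filterMap (fun p => if p.2 then some (p.1 + 1) else none) =
      l.filterMap (fun p => if p.2 then some (p.1 + 1) else none) := by
  simp

theorem filterMap_cuts_true (a : Int) (l : List (Int × Bool)) :
    ((a, true) :: l).filterMap (fun p => if p.2 then some (p.1 + 1) else none) =
      (a + 1) :: l.filterMap (fun p => if p.2 then some (p.1 + 1) else none) := by
  simp

theorem cuts_eq (flags : List Bool) (k : Nat) :
    (PySem.List.enumerate flags (k : Int)).filterMap
        (fun p => if p.2 then some (p.1 + 1) else none) =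
      (cutsN flags k).map (fun m => (m : Int)) := by
  induction flags generalizing k with
  | nil => simp [PySem.List.enumerate_nil, cutsN]
  | cons f fs ih =>
      have hcast : (k : Int) + 1 = ((k + 1 : Nat) : Int) := by push_cast; ring
      cases f
      · rw [PySem.List.enumerate_cons, hcast, filterMap_cuts_false, ih (k + 1)]
        simp [cutsN]
      · rw [PySem.List.enumerate_cons, hcast, filterMap_cuts_true, ih (k + 1)]
        simp [cutsN]

theorem zipTail_map (L : List Nat) :
    ((L.map (fun m => (m : Int))).zip ((L.map (fun m => (m : Int))).tail)) =
      (L.zip L.tail).map (fun p => ((p.1 : Int), (p.2 : Int))) := by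
  induction L with
  | nil => simp
  | cons a l ih =>
      cases l with
      | nil => simp
      | cons b m => simpa using ih

-- port B's segment list is the Nat-level one
theorem alt_eq_segsN (inputStr : String) (cutFlags : List Bool) :
    constructResult_alt inputStr cutFlags =
      String.ofList (PySem.Chars.join ['/', ' ', ' ']
        (segsN inputStr.toList (boundsN 0 cutFlags))) := by
  have h0 : ((PySem.List.enumerate cutFlags 0).filterMap
      (fun p => if p.2 then some (p.1 + 1) else none)) =
      (cutsN cutFlags 0).map (fun m => (m : Int)) := by
    simpa using cuts_eq cutFlags 0
  simp only [constructResult_alt]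
  rw [h0]
  congr 1
  congr 1
  rw [show (0 : Int) :: ((cutsN cutFlags 0).map (fun m => (m : Int)) ++ [(cutFlags.length : Int)]) =
      (boundsN 0 cutFlags).map (fun m => (m : Int)) by simp [boundsN]]
  rw [zipTail_map]
  simp only [segsN, List.map_map]
  apply List.map_congr_left
  intro p _
  simp [segN, PySem.List.slice_natCast]

-- ===== VERDICT (by name: the statement is the Claim_ definition above) =====
theorem constructResult_spec : Claim_equal_constructResult := by
  intro inputStr cutFlags _ hpre
  unfold Spec_constructResult constructResult
  rw [alt_eq_segsN, crLoopA_eq_specF _ _ 0 (by simpa using hpre),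
      segsN_join_eq_specF _ _ 0 (by simpa using hpre)]
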